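-- pv_equiv track=rewrite | github.com/finlaymcnally/RecipeImporter | cookimport/staging/writer.py | _knowledge_counts_for_block_map
-- ===== SOURCE A (Python) =====
-- from typing import Any, Mapping
--
-- def _knowledge_counts_for_block_map(block_category_by_index: Mapping[int, str]) -> dict[str, int]:
--     return {
--         "knowledge_blocks": sum(
--             1 for category in block_category_by_index.values() if category == "knowledge"
--         ),
--         "other_blocks": sum(
--             1 for category in block_category_by_index.values() if category == "other"
--         ),
--     }
-- ===== SOURCE B (Python) =====
-- def _knowledge_counts_for_block_map(block_category_by_index):
--     def go(vals):
--         if not vals: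
--             return (0, 0)
--         if len(vals) == 1:
--             v = vals[0]
--             return (1 if v == "knowledge" else 0, 1 if v == "other" else 0)
--         mid = len(vals) // 2
--         k1, o1 = go(vals[:mid])
--         k2, o2 = go(vals[mid:])
--         return (k1 + k2, o1 + o2)
--     k, o = go(list(block_category_by_index.values()))
--     return {"knowledge_blocks": k, "other_blocks": o}
-- ===== Notes on version B (the rewrite author's own statement) =====
-- stated objective: alternative
-- what changed: B counts by divide and conquer: it recursively splits the values list in halves, each call returning a (knowledge, other) pair that is summed when merging, instead of A's two linear filtered sum() generator passes.
import Mathlib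
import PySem

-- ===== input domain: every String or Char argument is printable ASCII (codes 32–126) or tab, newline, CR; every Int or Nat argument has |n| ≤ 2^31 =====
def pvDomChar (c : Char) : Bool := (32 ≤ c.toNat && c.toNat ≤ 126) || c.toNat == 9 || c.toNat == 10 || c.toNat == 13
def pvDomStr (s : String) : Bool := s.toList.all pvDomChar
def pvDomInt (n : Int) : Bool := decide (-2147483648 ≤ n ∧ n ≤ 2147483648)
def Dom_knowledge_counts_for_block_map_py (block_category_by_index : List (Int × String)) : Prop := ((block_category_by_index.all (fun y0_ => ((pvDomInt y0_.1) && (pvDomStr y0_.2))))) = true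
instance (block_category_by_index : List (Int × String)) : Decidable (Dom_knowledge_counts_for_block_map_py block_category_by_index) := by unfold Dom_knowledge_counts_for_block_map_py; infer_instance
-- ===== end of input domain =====

-- B counts by divide and conquer over the values list (recursive halving, merging
-- (knowledge, other) pairs) instead of A's two filtered sum() passes (objective: alternative).

-- ===== PORT A =====
-- two generator-sum passes over block_category_by_index.values()
def knowledge_counts_for_block_map_py (block_category_by_index : List (Int × String)) : List (String × Int) :=
  let vs := (PySem.Dict.ofList block_category_by_index).values
  [("knowledge_blocks", vs.foldl (fun acc category => if category == "knowledge" then acc + 1 else acc) 0),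
   ("other_blocks", vs.foldl (fun acc category => if category == "other" then acc + 1 else acc) 0)]

-- ===== PORT B =====
-- go(vals): divide-and-conquer returning the pair (knowledge count, other count)
def pvGoB (vals : List String) : Int × Int :=
  if h0 : vals = [] then (0, 0)
  else if h1 : vals.length = 1 then
    let v := (PySem.List.pyGet? vals 0).getD ""   -- vals[0]; in range since len = 1
    ((if v == "knowledge" then 1 else 0), (if v == "other" then 1 else 0))
  else
    let mid : Int := PySem.Int.floordiv (vals.length : Int) 2
    let p1 := pvGoB (PySem.List.slice vals none (some mid))
    let p2 := pvGoB (PySem.List.slice vals (some mid) none)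
    (p1.1 + p2.1, p1.2 + p2.2)
termination_by vals.length
decreasing_by
  all_goals
    rw [show PySem.Int.floordiv (vals.length : Int) 2 = ((vals.length / 2 : Nat) : Int) from by
      exact_mod_cast PySem.Int.floordiv_natCast vals.length 2]
    have hne : vals.length ≠ 0 := fun h => h0 (List.length_eq_zero_iff.mp h)
  · rw [PySem.List.slice_to_natCast]
    simp only [List.length_take]
    omega
  · rw [PySem.List.slice_from_natCast]
    simp only [List.length_drop]
    omega

def knowledge_counts_for_block_map_py_alt (block_category_by_index : List (Int × String)) : List (String × Int) :=
  let p := pvGoB (PySem.Dict.ofList block_category_by_index).values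
  [("knowledge_blocks", p.1), ("other_blocks", p.2)]

-- ===== PRECONDITION & SPEC =====
def Spec_knowledge_counts_for_block_map_py (block_category_by_index : List (Int × String)) (out : List (String × Int)) : Prop := out = knowledge_counts_for_block_map_py_alt block_category_by_index
instance (block_category_by_index : List (Int × String)) (out : List (String × Int)) : Decidable (Spec_knowledge_counts_for_block_map_py block_category_by_index out) := by unfold Spec_knowledge_counts_for_block_map_py; infer_instance

-- ===== CLAIM (what is proved, stated in full; the proofs are below) =====
def Claim_equal_knowledge_counts_for_block_map_py : Prop := ∀ (block_category_by_index : List (Int × String)), Dom_knowledge_counts_for_block_map_py block_category_by_index → Spec_knowledge_counts_for_block_map_py block_category_by_index (knowledge_counts_for_block_map_py block_category_by_index)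

-- ===== LEMMAS AND PROOFS =====

-- ===== VERDICT (by name: the statement is the Claim_ definition above) =====
theorem pvGoB_eq (vals : List String) :
    pvGoB vals = ((vals.count "knowledge" : Int), (vals.count "other" : Int)) := by
  induction vals using pvGoB.induct with
  | case1 => simp [pvGoB]
  | case2 vs h0 h1 =>
    obtain ⟨v, rfl⟩ := List.length_eq_one_iff.mp h1
    simp [pvGoB, PySem.List.pyGet?, PySem.List.pyIdx?, List.count_singleton]
  | case3 vs h0 h1 mid ih2 ih1 =>
    have hm : mid = ((vs.length / 2 : Nat) : Int) := by
      exact_mod_cast PySem.Int.floordiv_natCast vs.length 2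
    rw [hm, PySem.List.slice_to_natCast] at ih2
    rw [hm, PySem.List.slice_from_natCast] at ih1
    rw [pvGoB, dif_neg h0, dif_neg h1]
    simp only [show PySem.Int.floordiv ((vs.length : Int)) 2 = ((vs.length / 2 : Nat) : Int) from by
        exact_mod_cast PySem.Int.floordiv_natCast vs.length 2,
      PySem.List.slice_to_natCast, PySem.List.slice_from_natCast, ih1, ih2, Prod.mk.injEq]
    constructor <;>
      rw [← Nat.cast_add, ← List.count_append, List.take_append_drop]

-- ===== VERDICT (by name: the statement is the Claim_ definition above) =====
theorem knowledge_counts_for_block_map_py_spec : Claim_equal_knowledge_counts_for_block_map_py := by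
  intro l _
  unfold Spec_knowledge_counts_for_block_map_py
  unfold knowledge_counts_for_block_map_py knowledge_counts_for_block_map_py_alt
  simp only [pvGoB_eq, PySem.List.foldl_beq_add_one, zero_add]
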